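-- pv_equiv track=rewrite | github.com/hmk252/ARC-9th-place | src/arc_2020_ensemble_26_solutions.py | Translation_Eq
-- ===== SOURCE A (Python) =====
-- def Translation_Eq(x, Param):
--     r, s = Param
--     n = len(x)
--     k = len(x[0])
--
--     E = {}
--     for i in range(n):
--         for j in range(k):
--             u = i % r
--             v = j % s
--             p = (u, v)
--             if p not in E:
--                 E[p] = [(i, j)]
--             else:
--                 E[p] = E[p] + [(i, j)]
--     Ans = []
--     for p in E:
--         item = E[p]
--         if len(item) > 1:
--             Ans.append(item)
--     return Ans
-- ===== SOURCE B (Python) =====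
-- def Translation_Eq(x, Param):
--     r, s = Param
--     n = len(x)
--     k = len(x[0])
--     if k == 0:
--         return []
--     rows = {}
--     for i in range(n):
--         rows[i % r] = rows.get(i % r, []) + [i]
--     cols = {}
--     for j in range(k):
--         cols[j % s] = cols.get(j % s, []) + [j]
--     Ans = []
--     for u, R in rows.items():
--         for v, C in cols.items():
--             if len(R) * len(C) > 1:
--                 Ans.append([(i, j) for i in R for j in C])
--     return Ans
-- ===== Notes on version B (the rewrite author's own statement) =====
-- stated objective: faster
-- what changed: Instead of scanning all n*k cells and growing one dict of cell groups by per-cell list concatenation, B groups row indices mod r and column indices mod s separately and emits each group as the row-major product of a row class and a column class, in the same first-appearance order.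
import Mathlib
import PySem

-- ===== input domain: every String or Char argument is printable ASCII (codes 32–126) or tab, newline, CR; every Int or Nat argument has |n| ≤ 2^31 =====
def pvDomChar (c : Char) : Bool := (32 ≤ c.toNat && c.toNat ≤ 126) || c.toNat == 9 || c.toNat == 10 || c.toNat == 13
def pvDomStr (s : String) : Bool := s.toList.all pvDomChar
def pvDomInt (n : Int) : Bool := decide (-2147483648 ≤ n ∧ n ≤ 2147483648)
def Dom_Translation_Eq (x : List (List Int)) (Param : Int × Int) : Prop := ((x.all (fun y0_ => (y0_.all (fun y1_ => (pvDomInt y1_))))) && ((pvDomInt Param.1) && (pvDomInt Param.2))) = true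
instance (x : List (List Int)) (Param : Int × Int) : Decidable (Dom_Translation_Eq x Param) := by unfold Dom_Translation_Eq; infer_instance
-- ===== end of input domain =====

-- B replaces A's per-cell dict building (with a list concatenation per cell) by grouping row
-- indices mod r and column indices mod s separately and emitting each group as the product of
-- a row class and a column class, in the same first-appearance order.

-- ===== PORT A =====
def Translation_Eq (x : List (List Int)) (Param : Int × Int) : List (List (Int × Int)) :=
  let r := Param.1
  let s := Param.2
  let n : Int := (x.length : Int)
  -- k = len(x[0]); Pre_ excludes x = [] (IndexError in Python)
  let k : Int := (((PySem.List.pyGet? x 0).getD []).length : Int)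
  let E := (PySem.List.pyRange 0 n 1).foldl (fun E i =>
    (PySem.List.pyRange 0 k 1).foldl (fun E j =>
      let u := PySem.Int.mod i r
      let v := PySem.Int.mod j s
      let p := (u, v)
      if !(E.contains p) then E.insert p [(i, j)]
      else E.insert p (E.getD p [] ++ [(i, j)])) E) PySem.Dict.empty
  E.keys.foldl (fun Ans p =>
    let item := E.getD p []   -- E[p]; every p iterated is a key of E
    if item.length > 1 then Ans ++ [item] else Ans) []

-- ===== PORT B =====
def Translation_Eq_alt (x : List (List Int)) (Param : Int × Int) : List (List (Int × Int)) :=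
  let r := Param.1
  let s := Param.2
  let n : Int := (x.length : Int)
  let k : Int := (((PySem.List.pyGet? x 0).getD []).length : Int)
  if k = 0 then []
  else
    let rows := (PySem.List.pyRange 0 n 1).foldl (fun d i =>
      d.insert (PySem.Int.mod i r) (d.getD (PySem.Int.mod i r) [] ++ [i])) PySem.Dict.empty
    let cols := (PySem.List.pyRange 0 k 1).foldl (fun d j =>
      d.insert (PySem.Int.mod j s) (d.getD (PySem.Int.mod j s) [] ++ [j])) PySem.Dict.empty
    rows.items.foldl (fun Ans uR =>
      cols.items.foldl (fun Ans vC =>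
        if uR.2.length * vC.2.length > 1 then
          Ans ++ [uR.2.flatMap (fun i => vC.2.map (fun j => (i, j)))]
        else Ans) Ans) []

-- ===== PRECONDITION & SPEC =====
-- Pre_ excludes exactly the inputs on which the Python A raises: x = [] (IndexError on x[0]),
-- and r = 0 or s = 0 when the grid has at least one cell (ZeroDivisionError on %).
def Pre_Translation_Eq (x : List (List Int)) (Param : Int × Int) : Prop :=
  x ≠ [] ∧ ((x.headD []).length = 0 ∨ (Param.1 ≠ 0 ∧ Param.2 ≠ 0))
instance (x : List (List Int)) (Param : Int × Int) : Decidable (Pre_Translation_Eq x Param) := by unfold Pre_Translation_Eq; infer_instance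
def pvWitness_Translation_Eq : List (List Int) × (Int × Int) := ([[1, 2], [3, 4]], (2, 2))

def Spec_Translation_Eq (x : List (List Int)) (Param : Int × Int) (out : List (List (Int × Int))) : Prop := out = Translation_Eq_alt x Param
instance (x : List (List Int)) (Param : Int × Int) (out : List (List (Int × Int))) : Decidable (Spec_Translation_Eq x Param out) := by unfold Spec_Translation_Eq; infer_instance

-- ===== CLAIM (what is proved, stated in full; the proofs are below) =====
def Claim_equal_Translation_Eq : Prop := ∀ (x : List (List Int)) (Param : Int × Int), Dom_Translation_Eq x Param → Pre_Translation_Eq x Param → Spec_Translation_Eq x Param (Translation_Eq x Param)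

-- ===== LEMMAS AND PROOFS =====

-- the composite key and the row-major cell list of the grid
def key2 (r s : Int) (p : Int × Int) : Int × Int := (PySem.Int.mod p.1 r, PySem.Int.mod p.2 s)
def cells (rl kl : List Int) : List (Int × Int) := rl.flatMap (fun i => kl.map (fun j => (i, j)))

-- A's two branches are one and the same dict update
lemma stepA {κ : Type} [BEq κ] [LawfulBEq κ] {β : Type} (E : PySem.Dict κ (List β)) (p : κ) (c : β) :
    (if !(E.contains p) then E.insert p [c] else E.insert p (E.getD p [] ++ [c]))
    = E.insert p (E.getD p [] ++ [c]) := by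
  by_cases h : E.contains p
  · simp [h]
  · simp only [Bool.not_eq_true] at h
    rw [PySem.Dict.getD_of_not_contains E [] h]
    simp [h]

-- a group-by dict loop: lookups, keys and items of the finished dict
lemma groupGetD {κ β : Type} [BEq κ] [LawfulBEq κ] (key : β → κ) (l : List β) (c : κ) :
    (l.foldl (fun d b => d.insert (key b) (d.getD (key b) [] ++ [b])) PySem.Dict.empty).getD c []
    = l.filter (fun b => key b == c) := by
  have h1 : (l.foldl (fun d b => d.insert (key b) (d.getD (key b) [] ++ [b])) PySem.Dict.empty)
      = l.foldl (fun d b => d.modify (key b) [] (· ++ [b])) PySem.Dict.empty :=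
    PySem.List.foldl_congr_mem _ _ _ _ (fun d b _ => rfl)
  rw [h1]
  have h2 := PySem.Dict.getD_foldl_modify_append (l.map (fun b => (key b, b))) PySem.Dict.empty c
  rw [List.foldl_map] at h2
  simpa [List.filter_map, Function.comp_def, List.map_map] using h2

lemma groupKeys {κ β : Type} [BEq κ] [LawfulBEq κ] (key : β → κ) (l : List β) :
    (l.foldl (fun d b => d.insert (key b) (d.getD (key b) [] ++ [b])) PySem.Dict.empty).keys
    = PySem.Set.ofList (l.map key) := by
  have h1 : (l.foldl (fun d b => d.insert (key b) (d.getD (key b) [] ++ [b])) PySem.Dict.empty)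
      = l.foldl (fun d b => d.modify (key b) [] (· ++ [b])) PySem.Dict.empty :=
    PySem.List.foldl_congr_mem _ _ _ _ (fun d b _ => rfl)
  rw [h1]
  rw [PySem.Dict.keys_foldl_modify_key l key [] (fun _ b => (· ++ [b]))]
  simp [PySem.Set.update_nil_left]

lemma groupNodup {κ β : Type} [BEq κ] [LawfulBEq κ] (key : β → κ) (l : List β) :
    (l.foldl (fun d b => d.insert (key b) (d.getD (key b) [] ++ [b])) PySem.Dict.empty).keys.Nodup := by
  have h1 : (l.foldl (fun d b => d.insert (key b) (d.getD (key b) [] ++ [b])) PySem.Dict.empty)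
      = l.foldl (fun d b => d.modify (key b) [] (· ++ [b])) PySem.Dict.empty :=
    PySem.List.foldl_congr_mem _ _ _ _ (fun d b _ => rfl)
  rw [h1]
  exact PySem.Dict.nodup_keys_foldl_modify_key l key [] (fun _ b => (· ++ [b])) _ PySem.Dict.nodup_keys_empty

lemma groupItems {κ β : Type} [BEq κ] [LawfulBEq κ] (key : β → κ) (l : List β) :
    (l.foldl (fun d b => d.insert (key b) (d.getD (key b) [] ++ [b])) PySem.Dict.empty).items
    = (PySem.Set.ofList (l.map key)).map (fun c => (c, l.filter (fun b => key b == c))) := by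
  rw [PySem.Dict.items_eq_map_keys _ (groupNodup key l) [], groupKeys key l]
  exact List.map_congr_left (fun c _ => by rw [groupGetD key l c])

lemma foldl_add_absorb {α : Type} [BEq α] [LawfulBEq α] (l : List α) :
    ∀ (s : PySem.Set α), (∀ a ∈ l, a ∈ s) → l.foldl PySem.Set.add s = s := by
  induction l with
  | nil => intro s _; rfl
  | cons a t ih =>
    intro s h
    simp only [List.foldl_cons]
    rw [PySem.Set.add_of_mem (h a (List.mem_cons_self))]
    exact ih s (fun b hb => h b (List.mem_cons_of_mem a hb))

lemma foldl_add_fresh_row (c : Int) (l : List Int) :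
    ∀ (d : List Int) (s : List (Int × Int)), (∀ v : Int, (c, v) ∉ s) →
    (l.map (fun b => (c, b))).foldl PySem.Set.add (s ++ d.map (fun b => (c, b)))
    = s ++ (l.foldl PySem.Set.add d).map (fun b => (c, b)) := by
  induction l with
  | nil => intro d s _; simp
  | cons b t ih =>
    intro d s h
    simp only [List.map_cons, List.foldl_cons]
    have hmem : ((c, b) ∈ s ++ d.map (fun b => (c, b))) ↔ b ∈ d := by
      constructor
      · intro hx
        rcases List.mem_append.mp hx with hs | hm
        · exact absurd hs (h b)
        · obtain ⟨v, hv, hvb⟩ := List.mem_map.mp hm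
          obtain ⟨-, rfl⟩ := Prod.mk.injEq .. ▸ hvb
          exact hv
      · intro hb
        exact List.mem_append.mpr (Or.inr (List.mem_map.mpr ⟨b, hb, rfl⟩))
    by_cases hb : b ∈ d
    · rw [PySem.Set.add_eq_ite, if_pos (hmem.mpr hb), PySem.Set.add_of_mem hb]
      exact ih d s h
    · rw [PySem.Set.add_eq_ite, if_neg (fun hx => hb (hmem.mp hx)), PySem.Set.add_of_not_mem hb]
      have : (s ++ d.map (fun b => (c, b))) ++ [(c, b)] = s ++ (d ++ [b]).map (fun b => (c, b)) := by
        simp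
      rw [this]
      exact ih (d ++ [b]) s h

lemma keyProd (f g : Int → Int) (C : List Int) (R : List Int) :
    ∀ (U : List Int),
    (R.flatMap (fun i => C.map (fun j => (f i, g j)))).foldl PySem.Set.add (U ×ˢ PySem.Set.ofList (C.map g))
    = (R.foldl (fun U i => PySem.Set.add U (f i)) U) ×ˢ PySem.Set.ofList (C.map g) := by
  induction R with
  | nil => intro U; rfl
  | cons i R ih =>
    intro U
    simp only [List.flatMap_cons, List.foldl_append, List.foldl_cons]
    have hrow : (C.map (fun j => (f i, g j))).foldl PySem.Set.add (U ×ˢ PySem.Set.ofList (C.map g))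
        = (PySem.Set.add U (f i)) ×ˢ PySem.Set.ofList (C.map g) := by
      by_cases hf : f i ∈ U
      · rw [foldl_add_absorb _ _ ?_, PySem.Set.add_of_mem hf]
        intro a ha
        obtain ⟨j, hj, rfl⟩ := List.mem_map.mp ha
        exact List.mem_product.mpr ⟨hf, (PySem.Set.mem_ofList _ _).mpr (List.mem_map.mpr ⟨j, hj, rfl⟩)⟩
      · have h1 : C.map (fun j => (f i, g j)) = (C.map g).map (fun b => (f i, b)) := by
          simp [List.map_map]
        have h0 : U ×ˢ PySem.Set.ofList (C.map g)
            = U ×ˢ PySem.Set.ofList (C.map g) ++ ([] : List Int).map (fun b => (f i, b)) := by simp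
        rw [h1, h0, foldl_add_fresh_row (f i) (C.map g) [] _ ?_]
        · rw [← PySem.Set.ofList_eq_foldl, PySem.Set.add_of_not_mem hf]
          show _ = (U ++ [f i]).flatMap _
          rw [List.flatMap_append]
          simp only [List.flatMap_cons, List.flatMap_nil, List.append_nil]
          rfl
        · intro v hv
          exact hf (List.mem_product.mp hv).1
    rw [hrow]
    exact ih (PySem.Set.add U (f i))

-- first-appearance order of the composite keys is the product of the two first-appearance orders
lemma keyMain (f g : Int → Int) (R C : List Int) :
    PySem.Set.ofList (R.flatMap (fun i => C.map (fun j => (f i, g j))))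
    = PySem.Set.ofList (R.map f) ×ˢ PySem.Set.ofList (C.map g) := by
  rw [PySem.Set.ofList_eq_foldl]
  have h := keyProd f g C R []
  rw [show (([] : List Int) ×ˢ PySem.Set.ofList (C.map g)) = ([] : List (Int × Int)) from rfl] at h
  rw [h, ← PySem.Set.update_map_eq_foldl_add, PySem.Set.update_nil_left]

lemma pairBeq (a b c d : Int) : ((a, b) == (c, d)) = (a == c && b == d) := rfl

-- the cells of one composite group are the product of a row class and a column class
lemma filterProd (r s u v : Int) (R C : List Int) :
    (R.flatMap (fun i => C.map (fun j => ((i : Int), j)))).filter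
        (fun p => (PySem.Int.mod p.1 r, PySem.Int.mod p.2 s) == (u, v))
    = (R.filter (fun i => PySem.Int.mod i r == u)) ×ˢ (C.filter (fun j => PySem.Int.mod j s == v)) := by
  induction R with
  | nil => rfl
  | cons i R ih =>
    simp only [List.flatMap_cons, List.filter_append, List.filter_map, List.filter_cons]
    rw [ih]
    by_cases hi : PySem.Int.mod i r = u
    · have h1 : ∀ x ∈ C, ((fun p => (PySem.Int.mod p.1 r, PySem.Int.mod p.2 s) == (u, v)) ∘ (fun j => (i, j))) x
          = (fun j => PySem.Int.mod j s == v) x := by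
        intro x _
        simp [pairBeq, hi]
      rw [List.filter_congr h1, hi]
      simp only [beq_self_eq_true, if_pos]
      rw [List.product_cons]
    · have h1 : ∀ x ∈ C, ((fun p => (PySem.Int.mod p.1 r, PySem.Int.mod p.2 s) == (u, v)) ∘ (fun j => (i, j))) x
          = (fun _ => false) x := by
        intro x _
        simp [pairBeq, hi]
      rw [List.filter_congr h1]
      simp [hi]

-- A's double loop builds exactly the group-by dict over the row-major cell list
lemma A_dict (r s : Int) (rl kl : List Int) :
    rl.foldl (fun E i => kl.foldl (fun E j =>
      let u := PySem.Int.mod i r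
      let v := PySem.Int.mod j s
      let p := (u, v)
      if !(E.contains p) then E.insert p [(i, j)]
      else E.insert p (E.getD p [] ++ [(i, j)])) E) PySem.Dict.empty
    = (cells rl kl).foldl (fun d b => d.insert (key2 r s b) (d.getD (key2 r s b) [] ++ [b])) PySem.Dict.empty := by
  rw [cells, List.foldl_flatMap]
  apply List.foldl_ext
  intro E i _
  rw [List.foldl_map]
  apply List.foldl_ext
  intro E' j _
  dsimp only [key2]
  exact stepA E' _ _

-- the two result loops compute the same list, for ANY row/column index lists
lemma AB_core (r s : Int) (rl kl : List Int) :
    (let E := rl.foldl (fun E i => kl.foldl (fun E j =>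
        let u := PySem.Int.mod i r
        let v := PySem.Int.mod j s
        let p := (u, v)
        if !(E.contains p) then E.insert p [(i, j)]
        else E.insert p (E.getD p [] ++ [(i, j)])) E) PySem.Dict.empty
     E.keys.foldl (fun Ans p =>
        let item := E.getD p []
        if item.length > 1 then Ans ++ [item] else Ans) [])
    = (let rows := rl.foldl (fun d i => d.insert (PySem.Int.mod i r) (d.getD (PySem.Int.mod i r) [] ++ [i])) PySem.Dict.empty
       let cols := kl.foldl (fun d j => d.insert (PySem.Int.mod j s) (d.getD (PySem.Int.mod j s) [] ++ [j])) PySem.Dict.empty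
       rows.items.foldl (fun Ans uR => cols.items.foldl (fun Ans vC =>
         if uR.2.length * vC.2.length > 1 then Ans ++ [uR.2.flatMap (fun i => vC.2.map (fun j => (i, j)))] else Ans) Ans) []) := by
  dsimp only
  rw [A_dict r s rl kl]
  rw [groupKeys (key2 r s) (cells rl kl)]
  rw [groupItems (fun i => PySem.Int.mod i r) rl, groupItems (fun j => PySem.Int.mod j s) kl]
  have hmap : (cells rl kl).map (key2 r s)
      = rl.flatMap (fun i => kl.map (fun j => (PySem.Int.mod i r, PySem.Int.mod j s))) := by
    simp only [cells, List.map_flatMap, List.map_map]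
    rfl
  rw [hmap, keyMain (fun i => PySem.Int.mod i r) (fun j => PySem.Int.mod j s) rl kl]
  have hbody : ∀ (Ans : List (List (Int × Int))) (c : Int × Int), c ∈ (PySem.Set.ofList (rl.map fun i => PySem.Int.mod i r) ×ˢ PySem.Set.ofList (kl.map fun j => PySem.Int.mod j s)) →
      (fun (Ans : List (List (Int × Int))) (c : Int × Int) =>
        if ((cells rl kl).foldl (fun d b => d.insert (key2 r s b) (d.getD (key2 r s b) [] ++ [b])) PySem.Dict.empty |>.getD c []).length > 1
        then Ans ++ [((cells rl kl).foldl (fun d b => d.insert (key2 r s b) (d.getD (key2 r s b) [] ++ [b])) PySem.Dict.empty |>.getD c [])]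
        else Ans) Ans c
      = (fun (Ans : List (List (Int × Int))) (c : Int × Int) =>
        if ((rl.filter (fun i => PySem.Int.mod i r == c.1)) ×ˢ (kl.filter (fun j => PySem.Int.mod j s == c.2))).length > 1
        then Ans ++ [(rl.filter (fun i => PySem.Int.mod i r == c.1)) ×ˢ (kl.filter (fun j => PySem.Int.mod j s == c.2))]
        else Ans) Ans c := by
    intro Ans c _
    have hg := groupGetD (key2 r s) (cells rl kl) c
    have hf : (cells rl kl).filter (fun b => key2 r s b == c)
        = (rl.filter (fun i => PySem.Int.mod i r == c.1)) ×ˢ (kl.filter (fun j => PySem.Int.mod j s == c.2)) := by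
      obtain ⟨u, v⟩ := c
      exact filterProd r s u v rl kl
    dsimp only
    rw [hg, hf]
  rw [List.foldl_ext _ _ _ hbody]
  conv_rhs => rw [List.foldl_map]
  have hinner : ∀ (Ans : List (List (Int × Int))) (u : Int), u ∈ PySem.Set.ofList (rl.map fun i => PySem.Int.mod i r) →
      ((PySem.Set.ofList (kl.map fun j => PySem.Int.mod j s)).map (fun c => (c, kl.filter (fun b => PySem.Int.mod b s == c)))).foldl
        (fun Ans vC => if (rl.filter (fun b => PySem.Int.mod b r == u)).length * vC.2.length > 1
          then Ans ++ [(rl.filter (fun b => PySem.Int.mod b r == u)).flatMap (fun i => vC.2.map (fun j => (i, j)))] else Ans) Ans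
      = (PySem.Set.ofList (kl.map fun j => PySem.Int.mod j s)).foldl
        (fun Ans v => if (rl.filter (fun b => PySem.Int.mod b r == u)).length * (kl.filter (fun b => PySem.Int.mod b s == v)).length > 1
          then Ans ++ [(rl.filter (fun b => PySem.Int.mod b r == u)).flatMap (fun i => (kl.filter (fun b => PySem.Int.mod b s == v)).map (fun j => (i, j)))] else Ans) Ans := by
    intro Ans u _
    rw [List.foldl_map]
  rw [List.foldl_ext _ _ _ hinner]
  have hsplit : (PySem.Set.ofList (rl.map fun i => PySem.Int.mod i r) ×ˢ PySem.Set.ofList (kl.map fun j => PySem.Int.mod j s))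
      = (PySem.Set.ofList (rl.map fun i => PySem.Int.mod i r)).flatMap
          (fun u => (PySem.Set.ofList (kl.map fun j => PySem.Int.mod j s)).map (fun v => (u, v))) := rfl
  conv_lhs => rw [hsplit, List.foldl_flatMap]
  apply List.foldl_ext
  intro Ans u _
  rw [List.foldl_map]
  apply List.foldl_ext
  intro Ans2 v _
  dsimp only
  rw [List.length_product]
  rfl

lemma main_eq (x : List (List Int)) (Param : Int × Int) :
    Translation_Eq x Param = Translation_Eq_alt x Param := by
  unfold Translation_Eq Translation_Eq_alt
  dsimp only
  by_cases hk : (((PySem.List.pyGet? x 0).getD []).length : Int) = 0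
  · rw [if_pos hk, hk]
    have h0 : PySem.List.pyRange 0 0 1 = [] := rfl
    rw [h0]
    simp only [List.foldl_nil]
    rw [PySem.List.foldl_ignore]
    simp
  · rw [if_neg hk]
    exact AB_core Param.1 Param.2 _ _

-- ===== VERDICT (by name: the statement is the Claim_ definition above) =====
theorem Translation_Eq_spec : Claim_equal_Translation_Eq := by
  intro x Param _ _
  unfold Spec_Translation_Eq
  exact main_eq x Param
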